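-- pv_equiv track=rewrite | github.com/shashank732001/leetcode_GFG_python3 | Find all possible palindromic partitions of a String - GFG/find-all-possible-palindromic-partitions-of-a-string.py | allPalindromicPerms
-- ===== SOURCE A (Python) =====
-- def allPalindromicPerms(S):
--     # code here
--
--     n = len(S)
--     res = []
--
--     def subs(start,out):
--
--
--         if start==n:
--             res.append(out)
--             return
--
--         for i in range(start,n):
--             if S[start:i+1]==S[start:i+1][::-1]:
--                 subs(i+1,out+[S[start:i+1]])
--
--
--     subs(0,[])
--     return res
-- ===== SOURCE B (Python) =====
-- def allPalindromicPerms(S):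
--     n = len(S)
--     # bottom-up dynamic programming: parts[start] = all palindromic partitions of S[start:]
--     parts = [None] * (n + 1)
--     parts[n] = [[]]
--     for start in range(n - 1, -1, -1):
--         cur = []
--         for i in range(start, n):
--             piece = S[start:i + 1]
--             if piece == piece[::-1]:
--                 for rest in parts[i + 1]:
--                     cur.append([piece] + rest)
--         parts[start] = cur
--     return parts[0]
-- ===== Notes on version B (the rewrite author's own statement) =====
-- stated objective: alternative
-- what changed: Replaces A's accumulator-passing DFS (threading a partial partition and appending finished partitions to a shared res list) by bottom-up dynamic programming: an iterative table parts[start] of all partitions of S[start:], filled from n down to 0, with each piece prepended to the already-computed suffix partitions.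
import Mathlib
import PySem

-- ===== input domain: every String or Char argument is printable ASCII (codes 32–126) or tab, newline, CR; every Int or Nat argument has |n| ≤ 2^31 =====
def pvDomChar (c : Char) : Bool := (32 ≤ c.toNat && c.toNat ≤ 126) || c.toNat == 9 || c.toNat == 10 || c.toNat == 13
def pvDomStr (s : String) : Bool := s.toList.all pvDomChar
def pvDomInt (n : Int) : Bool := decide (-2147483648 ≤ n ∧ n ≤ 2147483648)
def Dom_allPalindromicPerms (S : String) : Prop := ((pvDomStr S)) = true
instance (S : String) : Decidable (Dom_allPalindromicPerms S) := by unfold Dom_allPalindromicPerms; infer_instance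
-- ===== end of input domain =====

-- B replaces A's accumulator-passing DFS by bottom-up dynamic programming over suffixes.

-- ===== PORT A =====
-- subs(start, out) with the shared list `res` threaded through; loopA is the `for i in range(start, n)` loop.
-- S[start:i+1] with 0 ≤ start ≤ i < n is exactly drop/take; the [::-1] palindrome test is List.reverse.
mutual
def subsA (s : List Char) (start : Nat) (out : List String) (res : List (List String)) :
    List (List String) :=
  if start = s.length then res ++ [out]
  else loopA s start start out res
termination_by 2 * (s.length - start) + 1
decreasing_by omega

def loopA (s : List Char) (start i : Nat) (out : List String) (res : List (List String)) :
    List (List String) :=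
  if _h : i < s.length then
    let t := (s.drop start).take (i + 1 - start)
    loopA s start (i + 1) out
      (if t = t.reverse then subsA s (i + 1) (out ++ [String.ofList t]) res else res)
  else res
termination_by 2 * (s.length - i)
decreasing_by all_goals omega
end

def allPalindromicPerms (S : String) : List (List String) :=
  subsA S.toList 0 [] []

-- ===== PORT B =====
-- Bottom-up DP. `tableB s k` is the list [parts[n-k], …, parts[n]] of Source B's table (head = the
-- most recently filled row); `rowB` is Source B's inner `for i in range(start, n)` loop, which reads
-- the already-computed row parts[i+1] at table offset i - start.
def rowB (s : List Char) (start : Nat) (tbl : List (List (List String))) (i : Nat)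
    (cur : List (List String)) : List (List String) :=
  if _h : i < s.length then
    let piece := (s.drop start).take (i + 1 - start)
    rowB s start tbl (i + 1)
      (if piece = piece.reverse then
        cur ++ (tbl.getD (i - start) []).map (fun rest => String.ofList piece :: rest)
      else cur)
  else cur
termination_by s.length - i

def tableB (s : List Char) : Nat → List (List (List String))
  | 0 => [[[]]]
  | k + 1 =>
    let tbl := tableB s k
    let start := s.length - (k + 1)
    rowB s start tbl start [] :: tbl

def allPalindromicPerms_alt (S : String) : List (List String) :=
  (tableB S.toList S.toList.length).getD 0 []

-- ===== PRECONDITION & SPEC =====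
def Spec_allPalindromicPerms (S : String) (out : List (List String)) : Prop := out = allPalindromicPerms_alt S
instance (S : String) (out : List (List String)) : Decidable (Spec_allPalindromicPerms S out) := by unfold Spec_allPalindromicPerms; infer_instance

-- ===== CLAIM (what is proved, stated in full; the proofs are below) =====
def Claim_equal_allPalindromicPerms : Prop := ∀ (S : String), Dom_allPalindromicPerms S → Spec_allPalindromicPerms S (allPalindromicPerms S)

-- ===== LEMMAS AND PROOFS =====

-- Proof-side reference recursion: specP s start = all palindromic partitions of s.drop start,
-- in A's enumeration order; specLoop is its i-loop. Both ports are related to it.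
mutual
def specP (s : List Char) (start : Nat) : List (List String) :=
  if start = s.length then [[]]
  else specLoop s start start []
termination_by 2 * (s.length - start) + 1
decreasing_by omega

def specLoop (s : List Char) (start i : Nat) (acc : List (List String)) : List (List String) :=
  if _h : i < s.length then
    let piece := (s.drop start).take (i + 1 - start)
    specLoop s start (i + 1)
      (if piece = piece.reverse then
        acc ++ (specP s (i + 1)).map (fun rest => String.ofList piece :: rest)
      else acc)
  else acc
termination_by 2 * (s.length - i)
decreasing_by all_goals omega
end

lemma specLoop_stop (s : List Char) (start i : Nat) (acc : List (List String))
    (hi : ¬ i < s.length) : specLoop s start i acc = acc := by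
  rw [specLoop]; simp [hi]

lemma loopA_stop (s : List Char) (start i : Nat) (out : List String)
    (res : List (List String)) (hi : ¬ i < s.length) : loopA s start i out res = res := by
  rw [loopA]; simp [hi]

-- specLoop only ever appends to its accumulator.
lemma specLoop_acc : ∀ (m : Nat) (s : List Char) (start i : Nat) (acc : List (List String)),
    s.length - i ≤ m → specLoop s start i acc = acc ++ specLoop s start i [] := by
  intro m
  induction m with
  | zero =>
    intro s start i acc h
    have hi : ¬ i < s.length := by omega
    rw [specLoop_stop s start i acc hi, specLoop_stop s start i [] hi]
    simp
  | succ m ih =>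
    intro s start i acc h
    by_cases hi : i < s.length
    · conv_lhs => rw [specLoop]
      conv_rhs => rw [specLoop]
      simp only [hi, dif_pos]
      have hm : s.length - (i + 1) ≤ m := by omega
      split_ifs with hp
      · rw [ih s start (i + 1) _ hm]
        conv_rhs => rw [ih s start (i + 1) _ hm]
        simp
      · exact ih s start (i + 1) acc hm
    · rw [specLoop_stop s start i acc hi, specLoop_stop s start i [] hi]
      simp

-- loopA's result is res followed by specLoop's partitions, each prefixed with out.
lemma loopA_eq : ∀ (m : Nat) (s : List Char) (start i : Nat) (out : List String)
    (res : List (List String)), s.length - i ≤ m →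
    loopA s start i out res = res ++ (specLoop s start i []).map (fun p => out ++ p) := by
  intro m
  induction m with
  | zero =>
    intro s start i out res h
    have hi : ¬ i < s.length := by omega
    rw [loopA_stop s start i out res hi, specLoop_stop s start i [] hi]
    simp
  | succ m ih =>
    intro s start i out res h
    by_cases hi : i < s.length
    · have hm : s.length - (i + 1) ≤ m := by omega
      conv_lhs => rw [loopA]
      conv_rhs => rw [specLoop]
      simp only [hi, dif_pos]
      set t := (s.drop start).take (i + 1 - start) with ht
      by_cases hp : t = t.reverse
      · rw [if_pos hp, if_pos hp]
        have hsub : subsA s (i + 1) (out ++ [String.ofList t]) res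
            = res ++ (specP s (i + 1)).map (fun p => (out ++ [String.ofList t]) ++ p) := by
          rw [subsA, specP]
          by_cases hL : i + 1 = s.length
          · rw [if_pos hL, if_pos hL]
            simp
          · rw [if_neg hL, if_neg hL]
            exact ih s (i + 1) (i + 1) (out ++ [String.ofList t]) res hm
        rw [hsub, ih s start (i + 1) out _ hm]
        conv_rhs => rw [specLoop_acc m s start (i + 1) _ hm]
        simp only [List.map_append, List.map_map, Function.comp_def, List.append_assoc,
          List.singleton_append, List.nil_append]
      · rw [if_neg hp, if_neg hp]
        exact ih s start (i + 1) out res hm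
    · rw [loopA_stop s start i out res hi, specLoop_stop s start i [] hi]
      simp

-- If the table row at offset i - start holds specP s (i+1) for every i in range, the row
-- computation equals the reference loop.
lemma rowB_eq : ∀ (m : Nat) (s : List Char) (start : Nat) (tbl : List (List (List String)))
    (i : Nat) (cur : List (List String)), s.length - i ≤ m → start ≤ i →
    (∀ i', start ≤ i' → i' < s.length → tbl.getD (i' - start) [] = specP s (i' + 1)) →
    rowB s start tbl i cur = specLoop s start i cur := by
  intro m
  induction m with
  | zero =>
    intro s start tbl i cur h _ _
    have hi : ¬ i < s.length := by omega
    rw [rowB, specLoop_stop s start i cur hi]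
    simp [hi]
  | succ m ih =>
    intro s start tbl i cur h hsi htbl
    by_cases hi : i < s.length
    · conv_lhs => rw [rowB]
      conv_rhs => rw [specLoop]
      simp only [hi, dif_pos]
      rw [htbl i hsi hi]
      exact ih s start tbl (i + 1) _ (by omega) (by omega) htbl
    · rw [rowB, specLoop_stop s start i cur hi]
      simp [hi]

-- The DP table agrees with the reference recursion.
lemma tableB_getD : ∀ (s : List Char) (k : Nat), k ≤ s.length →
    ∀ j, j ≤ k → (tableB s k).getD j [] = specP s (s.length - k + j) := by
  intro s k
  induction k with
  | zero =>
    intro _ j hj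
    interval_cases j
    rw [specP]
    simp [tableB]
  | succ k ih =>
    intro hk j hj
    have hk' : k ≤ s.length := by omega
    rw [tableB]
    match j with
    | 0 =>
      simp only [List.getD_cons_zero]
      have hrow : rowB s (s.length - (k + 1)) (tableB s k) (s.length - (k + 1)) []
          = specLoop s (s.length - (k + 1)) (s.length - (k + 1)) [] := by
        apply rowB_eq (s.length) s _ _ _ _ (by omega) (by omega)
        intro i' hlo hhi
        have hidx : i' - (s.length - (k + 1)) ≤ k := by omega
        have := ih hk' (i' - (s.length - (k + 1))) hidx
        rw [this]
        congr 1
        omega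
      rw [hrow]
      have hne : ¬ s.length - (k + 1) = s.length := by omega
      have hz : s.length - (k + 1) + 0 = s.length - (k + 1) := by omega
      rw [hz, specP]
      simp [hne]
    | j' + 1 =>
      simp only [List.getD_cons_succ]
      rw [ih hk' j' (by omega)]
      congr 1
      omega

-- ===== VERDICT (by name: the statement is the Claim_ definition above) =====
theorem allPalindromicPerms_spec : Claim_equal_allPalindromicPerms := by
  intro S _
  unfold Spec_allPalindromicPerms allPalindromicPerms allPalindromicPerms_alt
  rw [tableB_getD S.toList S.toList.length (le_refl _) 0 (by omega)]
  have hz : S.toList.length - S.toList.length + 0 = 0 := by omega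
  rw [hz, subsA, specP]
  by_cases h0 : 0 = S.toList.length
  · simp [← h0]
  · simp only [h0, if_false]
    rw [loopA_eq S.toList.length S.toList 0 0 [] [] (by omega)]
    simp
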